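-- pv_equiv track=rewrite | github.com/alex3165/coding-puzzle | adventofcode/2023/3/second.py | find_at_index
-- ===== SOURCE A (Python) =====
-- def parse_int(char):
--     try:
--         return int(char)
--     except ValueError:
--         return None
--
-- def is_dot(char):
--     return char == "."
--
-- def is_symbol(char):
--     return not is_dot(char) and parse_int(char) is None
--
-- def find_at_index(line, min_i, max_i):
--     state = ("", None, None)
--
--     valid_numbers = []
--     for i, char in enumerate(line):
--         if is_dot(char) or is_symbol(char):
--             if (
--                 state[1] is not None
--                 and state[2] is not None
--                 and state[1] <= max_i
--                 and min_i <= state[2]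
--             ):
--                 valid_numbers.append(state[0])
--
--             state = ("", None, None)
--             continue
--
--         if state[0] == "":
--             state = (char, i, i)
--         else:
--             state = (state[0] + char, state[1], i)
--
--     return valid_numbers
-- ===== SOURCE B (Python) =====
-- import re
--
--
-- def find_at_index(line, min_i, max_i):
--     return [
--         m.group()
--         for m in re.finditer(r"\d+", line)
--         if m.start() <= max_i and min_i <= m.end() - 1
--     ]
-- ===== Notes on version B (the rewrite author's own statement) =====
-- stated objective: idiomatic
-- what changed: Replaced the char-by-char state machine (accumulator string plus start/end indices, flushed on each non-digit) by a regex enumeration of maximal digit runs (re.finditer r'\d+') filtered by span overlap with [min_i, max_i].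
-- intended difference: On lines whose last character is a digit and whose trailing digit run overlaps [min_i, max_i], A silently omits that last number (no following non-digit ever flushes its accumulator) while B returns it; the number is in range, so including it is the intended behaviour. — e.g. on find_at_index("5", 0, 0): A returns [], B returns ["5"]
import Mathlib
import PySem

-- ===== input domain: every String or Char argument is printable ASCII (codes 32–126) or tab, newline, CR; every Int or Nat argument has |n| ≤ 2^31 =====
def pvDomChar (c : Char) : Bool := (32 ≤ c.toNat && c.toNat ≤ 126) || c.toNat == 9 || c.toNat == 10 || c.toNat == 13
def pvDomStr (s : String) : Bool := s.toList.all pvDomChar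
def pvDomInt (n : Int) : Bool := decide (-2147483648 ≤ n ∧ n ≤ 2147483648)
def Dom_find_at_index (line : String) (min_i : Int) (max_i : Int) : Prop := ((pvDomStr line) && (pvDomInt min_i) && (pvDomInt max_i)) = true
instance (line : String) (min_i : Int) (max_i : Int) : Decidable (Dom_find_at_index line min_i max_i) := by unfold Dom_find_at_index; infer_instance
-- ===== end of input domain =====

-- B enumerates the maximal digit runs (regex \d+) and keeps those whose span overlaps
-- [min_i, max_i] (idiomatic); A's loop never flushes a run that reaches the end of the
-- line, so on such lines B additionally returns the trailing number (stated as D_).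

-- ===== PORT A =====
-- parse_int(char): int(char) / None on ValueError (Python strings ported as List Char)
def pvParseInt (c : Char) : Option Int := PySem.Int.ofChars? [c]

-- is_dot(char)
def pvIsDot (c : Char) : Bool := c == '.'

-- is_symbol(char)
def pvIsSymbol (c : Char) : Bool := !pvIsDot c && (pvParseInt c).isNone

-- the `for i, char in enumerate(line)` loop, state = (current digits, start, end),
-- acc = valid_numbers; structural recursion carrying the enumerate index i
def pvALoop (min_i max_i : Int) : List Char → Int → (List Char × Option Int × Option Int) → List String → List String
  | [], _, _, acc => acc
  | c :: rest, i, (s, b, e), acc =>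
    if pvIsDot c || pvIsSymbol c then
      pvALoop min_i max_i rest (i + 1) ([], none, none)
        (match b, e with
         | some bv, some ev => if bv ≤ max_i ∧ min_i ≤ ev then acc ++ [String.ofList s] else acc
         | _, _ => acc)
    else if s = [] then
      pvALoop min_i max_i rest (i + 1) ([c], some i, some i) acc
    else
      pvALoop min_i max_i rest (i + 1) (s ++ [c], b, some i) acc

def find_at_index (line : String) (min_i : Int) (max_i : Int) : List String :=
  pvALoop min_i max_i line.toList 0 ([], none, none) []

-- ===== PORT B =====
-- re.finditer(r"\d+", line): the maximal digit runs left to right, as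
-- (start index, end index = m.end()-1, characters); exact for this pattern on the
-- ASCII domain (\d = '0'..'9' there)
def pvBRuns : List Char → Nat → List (Nat × Nat × List Char)
  | [], _ => []
  | c :: rest, i =>
    if c.isDigit then
      let run := c :: rest.takeWhile Char.isDigit
      (i, i + run.length - 1, run) :: pvBRuns (rest.dropWhile Char.isDigit) (i + run.length)
    else pvBRuns rest (i + 1)
termination_by cs _ => cs.length
decreasing_by
  · have h1 := List.length_dropWhile_le (p := Char.isDigit) (l := rest)
    simpa using Nat.lt_succ_of_le h1
  · simp


-- the comprehension's filter `m.start() <= max_i and min_i <= m.end() - 1` + `m.group()`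
def pvBFilt (min_i max_i : Int) (rs : List (Nat × Nat × List Char)) : List String :=
  rs.filterMap (fun r => if (r.1 : Int) ≤ max_i ∧ min_i ≤ (r.2.1 : Int) then some (String.ofList r.2.2) else none)

def find_at_index_alt (line : String) (min_i : Int) (max_i : Int) : List String :=
  pvBFilt min_i max_i (pvBRuns line.toList 0)

-- ===== PRECONDITION & SPEC =====
-- On lines whose last character is a digit and whose trailing digit run overlaps
-- [min_i, max_i], A silently omits that last number (no following non-digit ever
-- flushes its accumulator) while B returns it; the number is in range, so including
-- it is the intended behaviour.
def D_find_at_index (line : String) (min_i : Int) (max_i : Int) : Prop :=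
  0 < (line.toList.reverse.takeWhile Char.isDigit).length ∧
  ((line.toList.length : Int) - (line.toList.reverse.takeWhile Char.isDigit).length ≤ max_i) ∧
  (min_i ≤ (line.toList.length : Int) - 1)
instance (line : String) (min_i : Int) (max_i : Int) : Decidable (D_find_at_index line min_i max_i) := by unfold D_find_at_index; infer_instance

def Spec_find_at_index (line : String) (min_i : Int) (max_i : Int) (out : List String) : Prop := ¬ D_find_at_index line min_i max_i → out = find_at_index_alt line min_i max_i
instance (line : String) (min_i : Int) (max_i : Int) (out : List String) : Decidable (Spec_find_at_index line min_i max_i out) := by unfold Spec_find_at_index; infer_instance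

def pvDiffWitness_find_at_index : String × Int × Int := ("5", 0, 0)
def pvDiffWitnessOut_find_at_index : (List String) × (List String) := ([], ["5"])

-- ===== CLAIM =====
def Claim_unchanged_find_at_index : Prop := ∀ (line : String) (min_i : Int) (max_i : Int), Dom_find_at_index line min_i max_i → Spec_find_at_index line min_i max_i (find_at_index line min_i max_i)
def Claim_changed_find_at_index : Prop := Dom_find_at_index (pvDiffWitness_find_at_index.1) (pvDiffWitness_find_at_index.2.1) (pvDiffWitness_find_at_index.2.2) ∧ D_find_at_index (pvDiffWitness_find_at_index.1) (pvDiffWitness_find_at_index.2.1) (pvDiffWitness_find_at_index.2.2) ∧ find_at_index (pvDiffWitness_find_at_index.1) (pvDiffWitness_find_at_index.2.1) (pvDiffWitness_find_at_index.2.2) = pvDiffWitnessOut_find_at_index.1 ∧ find_at_index_alt (pvDiffWitness_find_at_index.1) (pvDiffWitness_find_at_index.2.1) (pvDiffWitness_find_at_index.2.2) = pvDiffWitnessOut_find_at_index.2 ∧ pvDiffWitnessOut_find_at_index.1 ≠ pvDiffWitnessOut_find_at_index.2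
def Claim_exact_find_at_index : Prop := ∀ (line : String) (min_i : Int) (max_i : Int), Dom_find_at_index line min_i max_i → D_find_at_index line min_i max_i → find_at_index line min_i max_i ≠ find_at_index_alt line min_i max_i

-- ===== LEMMAS AND PROOFS =====

-- proof helper: the runs A's loop actually flushes — the maximal digit runs that are
-- FOLLOWED by a non-digit character (a run reaching the end of the list is dropped)
def pvARuns : List Char → Nat → List (Nat × Nat × List Char)
  | [], _ => []
  | c :: rest, i =>
    if c.isDigit then
      let run := c :: rest.takeWhile Char.isDigit
      match hdw : rest.dropWhile Char.isDigit with
      | [] => []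
      | r :: rest' => (i, i + run.length - 1, run) :: pvARuns (r :: rest') (i + run.length)
    else pvARuns rest (i + 1)
termination_by cs _ => cs.length
decreasing_by
  · have h1 := List.length_dropWhile_le (p := Char.isDigit) (l := rest)
    rw [hdw] at h1
    simpa using Nat.lt_succ_of_le h1
  · simp

-- A's branch condition is exactly "char does not parse as an int"
theorem pv_branch_eq (c : Char) : (pvIsDot c || pvIsSymbol c) = (pvParseInt c).isNone := by
  by_cases h : c = '.'
  · subst h; decide
  · have hd : pvIsDot c = false := by simp [pvIsDot, h]
    simp [pvIsSymbol, hd]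

-- on the ASCII domain, a single char parses as an int exactly when it is a digit
set_option maxRecDepth 8192 in
theorem pv_parse_digit (c : Char) (h : pvDomChar c = true) :
    (pvParseInt c).isNone = !c.isDigit := by
  have h1 : c.toNat < 127 := by
    simp [pvDomChar] at h
    omega
  have hkey : ∀ n ∈ List.range 127,
      (pvParseInt (Char.ofNat n)).isNone = !(Char.ofNat n).isDigit := by decide
  have hv : Char.ofNat c.toNat = c := Char.ofNat_toNat c
  have := hkey c.toNat (List.mem_range.mpr h1)
  rwa [hv] at this

theorem pv_branch_digit (c : Char) (h : pvDomChar c = true) :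
    (pvIsDot c || pvIsSymbol c) = !c.isDigit := by
  rw [pv_branch_eq, pv_parse_digit c h]

-- the head of dropWhile fails the predicate
theorem pv_head_dropWhile {α : Type} (p : α → Bool) (l : List α) (r : α) (t : List α)
    (h : l.dropWhile p = r :: t) : p r = false := by
  induction l with
  | nil => simp at h
  | cons x xs ih =>
    by_cases hx : p x = true
    · rw [List.dropWhile_cons_of_pos hx] at h
      exact ih h
    · rw [List.dropWhile_cons_of_neg hx] at h
      cases h
      simpa using hx

-- takeWhile stops at a failing element regardless of what follows it
theorem pv_takeWhile_stop {α : Type} (p : α → Bool) (c : α) (hc : p c = false) :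
    ∀ (as zs : List α), (as ++ c :: zs).takeWhile p = as.takeWhile p := by
  intro as zs
  induction as with
  | nil => simp [hc]
  | cons a as ih =>
    by_cases ha : p a = true
    · simp [ha, ih]
    · simp [ha]

-- running A's loop across a block of digit chars just extends the current run
theorem pvALoop_run (min_i max_i : Int) (ds : List Char)
    (hds : ∀ d ∈ ds, d.isDigit = true) (hdom : ∀ d ∈ ds, pvDomChar d = true) :
    ∀ (rest : List Char) (i b e : Int) (s : List Char) (acc : List String),
      e = i - 1 → s ≠ [] →
      pvALoop min_i max_i (ds ++ rest) i (s, some b, some e) acc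
        = pvALoop min_i max_i rest (i + ds.length) (s ++ ds, some b, some (i + ds.length - 1)) acc := by
  induction ds with
  | nil =>
    intro rest i b e s acc he hs
    subst he; simp
  | cons d ds ih =>
    intro rest i b e s acc he hs
    have hd : d.isDigit = true := hds d (by simp)
    have hds' : ∀ x ∈ ds, x.isDigit = true := fun x hx => hds x (by simp [hx])
    have hdom' : ∀ x ∈ ds, pvDomChar x = true := fun x hx => hdom x (by simp [hx])
    have hbranch : (pvIsDot d || pvIsSymbol d) = false := by
      rw [pv_branch_digit d (hdom d (by simp)), hd]; rfl
    have step : pvALoop min_i max_i ((d :: ds) ++ rest) i (s, some b, some e) acc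
        = pvALoop min_i max_i (ds ++ rest) (i + 1) (s ++ [d], some b, some i) acc := by
      simp only [List.cons_append, pvALoop, hbranch, Bool.false_eq_true, if_false]
      simp [hs]
    have h2 := ih hds' hdom' rest (i + 1) b i (s ++ [d]) acc (by ring) (by simp)
    have e1 : ((i : Int) + 1) + (ds.length : Nat) = i + (((d :: ds).length : Nat) : Int) := by
      push_cast [List.length_cons]; ring
    rw [e1] at h2
    have e2 : s ++ [d] ++ ds = s ++ d :: ds := by simp
    rw [e2] at h2
    rw [step, h2]

-- the main loop invariant: from a clean state, A's loop appends exactly the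
-- filtered flushed runs of the remaining characters
theorem pv_main (min_i max_i : Int) :
    ∀ (n : Nat) (cs : List Char) (i : Nat) (acc : List String),
      cs.length ≤ n → (∀ c ∈ cs, pvDomChar c = true) →
      pvALoop min_i max_i cs (i : Int) ([], none, none) acc
        = acc ++ pvBFilt min_i max_i (pvARuns cs i) := by
  intro n
  induction n with
  | zero =>
    intro cs i acc hlen _
    have hcs : cs = [] := List.length_eq_zero_iff.mp (Nat.le_zero.mp hlen)
    subst hcs
    simp [pvALoop, pvARuns, pvBFilt]
  | succ n ih =>
    intro cs i acc hlen hdom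
    match cs with
    | [] => simp [pvALoop, pvARuns, pvBFilt]
    | c :: rest =>
      have hdomc : pvDomChar c = true := hdom c (by simp)
      have hdomr : ∀ x ∈ rest, pvDomChar x = true := fun x hx => hdom x (by simp [hx])
      cases hc : c.isDigit with
      | false =>
        have hb : (pvIsDot c || pvIsSymbol c) = true := by
          rw [pv_branch_digit c hdomc, hc]; rfl
        have step : pvALoop min_i max_i (c :: rest) (i : Int) ([], none, none) acc
            = pvALoop min_i max_i rest ((i : Int) + 1) ([], none, none) acc := by
          simp only [pvALoop, hb, if_true]
        have hcast : ((i : Int) + 1) = ((i + 1 : Nat) : Int) := by push_cast; ring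
        rw [step, hcast, ih rest (i + 1) acc (by simp at hlen ⊢; omega) hdomr]
        have hbr : pvARuns (c :: rest) i = pvARuns rest (i + 1) := by
          simp [pvARuns, hc]
        rw [hbr]
      | true =>
        have hb : (pvIsDot c || pvIsSymbol c) = false := by
          rw [pv_branch_digit c hdomc, hc]; rfl
        have hsplit : rest.takeWhile Char.isDigit ++ rest.dropWhile Char.isDigit = rest :=
          List.takeWhile_append_dropWhile
        have hdsdig : ∀ d ∈ rest.takeWhile Char.isDigit, d.isDigit = true := by
          intro d hd; exact List.mem_takeWhile_imp hd
        have hdsdom : ∀ d ∈ rest.takeWhile Char.isDigit, pvDomChar d = true := by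
          intro d hd
          apply hdomr
          rw [← hsplit]
          exact List.mem_append_left _ hd
        have step : pvALoop min_i max_i (c :: rest) (i : Int) ([], none, none) acc
            = pvALoop min_i max_i rest ((i : Int) + 1) ([c], some (i : Int), some (i : Int)) acc := by
          simp only [pvALoop, hb, Bool.false_eq_true, if_false]
          simp
        have step2 : pvALoop min_i max_i rest ((i : Int) + 1) ([c], some (i : Int), some (i : Int)) acc
            = pvALoop min_i max_i (rest.dropWhile Char.isDigit)
                (((i : Int) + 1) + (rest.takeWhile Char.isDigit).length)
                ([c] ++ rest.takeWhile Char.isDigit, some (i : Int),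
                 some ((((i : Int) + 1) + (rest.takeWhile Char.isDigit).length) - 1)) acc := by
          conv_lhs => rw [← hsplit]
          exact pvALoop_run min_i max_i _ hdsdig hdsdom _ ((i : Int) + 1) (i : Int) (i : Int)
            [c] acc (by ring) (by simp)
        rw [step, step2]
        set ds := rest.takeWhile Char.isDigit with hds
        set L := ds.length with hL
        cases hr : rest.dropWhile Char.isDigit with
        | nil =>
          have hbr : pvARuns (c :: rest) i = [] := by
            rw [pvARuns.eq_2, hr]
            simp [hc]
          rw [hbr]
          simp [pvALoop, pvBFilt]
        | cons r rest'' =>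
          have hrd : r.isDigit = false := pv_head_dropWhile _ _ _ _ hr
          have hrdom : pvDomChar r = true := by
            apply hdomr
            rw [← hsplit, hr]
            exact List.mem_append_right _ (by simp)
          have hbr2 : (pvIsDot r || pvIsSymbol r) = true := by
            rw [pv_branch_digit r hrdom, hrd]; rfl
          -- A's flush step on r
          have step3 : pvALoop min_i max_i (r :: rest'') (((i : Int) + 1) + L)
                ([c] ++ ds, some (i : Int), some ((((i : Int) + 1) + L) - 1)) acc
              = pvALoop min_i max_i rest'' ((((i : Int) + 1) + L) + 1) ([], none, none)
                (if (i : Int) ≤ max_i ∧ min_i ≤ (((i : Int) + 1) + L) - 1 then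
                   acc ++ [String.ofList ([c] ++ ds)] else acc) := by
            simp only [pvALoop, hbr2, if_true]
          rw [step3]
          have hlen2 : rest''.length ≤ n := by
            have h1 : rest.length ≤ n := by simpa using hlen
            have h2 : rest.length = L + (rest''.length + 1) := by
              rw [← hsplit, hr]; simp [hL]
            omega
          have hdom2 : ∀ x ∈ rest'', pvDomChar x = true := by
            intro x hx
            apply hdomr
            rw [← hsplit, hr]
            exact List.mem_append_right _ (by simp [hx])
          have hcast : ((((i : Int) + 1) + L) + 1) = ((i + L + 2 : Nat) : Int) := by
            push_cast; ring
          rw [hcast, ih rest'' (i + L + 2) _ hlen2 hdom2]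
          -- A's run list: the first run, then the tail after the blocking char r
          have hbr : pvARuns (c :: rest) i
              = (i, i + (c :: ds).length - 1, c :: ds) :: pvARuns (r :: rest'') (i + (c :: ds).length) := by
            rw [pvARuns.eq_2, hr]
            simp [hc, ← hds]
          have hbr3 : pvARuns (r :: rest'') (i + (c :: ds).length) = pvARuns rest'' (i + L + 2) := by
            rw [pvARuns.eq_2]
            simp only [hrd, Bool.false_eq_true, if_false]
            congr 1
          rw [hbr]
          simp only [pvBFilt, List.filterMap_cons, hbr3]
          have hnat : ((i + (c :: ds).length - 1 : Nat) : Int) = (((i : Int) + 1) + L) - 1 := by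
            have h1 : (i + (c :: ds).length - 1 : Nat) = i + L := by simp [hL]
            rw [h1]; push_cast; ring
          split_ifs with h1 h2 h3
          · simp
          · exfalso
            apply h2
            refine ⟨by exact_mod_cast h1.1, ?_⟩
            rw [hnat]
            exact h1.2
          · exfalso
            apply h1
            refine ⟨by exact_mod_cast h3.1, ?_⟩
            rw [← hnat]
            exact h3.2
          · simp

-- B's runs = A's flushed runs, plus the trailing end-of-list run when there is one
theorem pv_runs_rel :
    ∀ (n : Nat) (cs : List Char) (i : Nat), cs.length ≤ n →
      pvBRuns cs i = pvARuns cs i ++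
        (if 0 < (cs.reverse.takeWhile Char.isDigit).length then
           [(i + cs.length - (cs.reverse.takeWhile Char.isDigit).length,
             i + cs.length - 1, (cs.reverse.takeWhile Char.isDigit).reverse)]
         else []) := by
  intro n
  induction n with
  | zero =>
    intro cs i hlen
    have hcs : cs = [] := List.length_eq_zero_iff.mp (Nat.le_zero.mp hlen)
    subst hcs
    simp [pvBRuns, pvARuns]
  | succ n ih =>
    intro cs i hlen
    match cs with
    | [] => simp [pvBRuns, pvARuns]
    | c :: rest =>
      cases hc : c.isDigit with
      | false =>
        have hB : pvBRuns (c :: rest) i = pvBRuns rest (i + 1) := by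
          simp [pvBRuns, hc]
        have hA : pvARuns (c :: rest) i = pvARuns rest (i + 1) := by
          simp [pvARuns, hc]
        have htr : (c :: rest).reverse.takeWhile Char.isDigit
            = rest.reverse.takeWhile Char.isDigit := by
          rw [List.reverse_cons]
          have := pv_takeWhile_stop Char.isDigit c hc rest.reverse []
          simpa using this
        rw [hB, hA, htr, ih rest (i + 1) (by simp at hlen ⊢; omega)]
        congr 1
        split_ifs with h
        · have hle : (rest.reverse.takeWhile Char.isDigit).length ≤ rest.length := by
            have := (List.takeWhile_prefix (p := Char.isDigit) (l := rest.reverse)).length_le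
            simpa using this
          congr 2 <;> (simp; try omega)
        · rfl
      | true =>
        have hsplit : rest.takeWhile Char.isDigit ++ rest.dropWhile Char.isDigit = rest :=
          List.takeWhile_append_dropWhile
        set ds := rest.takeWhile Char.isDigit with hds
        have hB : pvBRuns (c :: rest) i
            = (i, i + (c :: ds).length - 1, c :: ds)
              :: pvBRuns (rest.dropWhile Char.isDigit) (i + (c :: ds).length) := by
          rw [pvBRuns.eq_2]
          simp [hc, ← hds]
        cases hr : rest.dropWhile Char.isDigit with
        | nil =>
          have hrest : rest = ds := by rw [← hsplit, hr]; simp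
          have hA : pvARuns (c :: rest) i = [] := by
            rw [pvARuns.eq_2, hr]; simp [hc]
          have halldig : ∀ x ∈ (c :: rest).reverse, x.isDigit = true := by
            intro x hx
            simp at hx
            rcases hx with hx | hx
            · have : x ∈ ds := by rw [← hrest]; exact hx
              exact List.mem_takeWhile_imp this
            · subst hx; exact hc
          have htw : (c :: rest).reverse.takeWhile Char.isDigit = (c :: rest).reverse :=
            List.takeWhile_eq_self_iff.mpr halldig
          rw [hB, hr, hA, htw]
          have hlen1 : (c :: rest).reverse.length = (c :: rest).length := by simp
          rw [hlen1]
          have hpos : 0 < (c :: rest).length := by simp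
          rw [if_pos hpos]
          simp [pvBRuns, hrest]
        | cons r rest' =>
          have hrd : r.isDigit = false := pv_head_dropWhile _ _ _ _ hr
          have hA : pvARuns (c :: rest) i
              = (i, i + (c :: ds).length - 1, c :: ds)
                :: pvARuns (r :: rest') (i + (c :: ds).length) := by
            rw [pvARuns.eq_2, hr]
            simp [hc, ← hds]
          have hlen2 : (r :: rest').length ≤ n := by
            have h1 : rest.length = ds.length + (rest'.length + 1) := by
              rw [← hsplit, hr]; simp
            simp at hlen ⊢
            omega
          have hshape : c :: rest = (c :: ds) ++ r :: rest' := by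
            rw [List.cons_append]
            congr 1
            rw [← hsplit, hr]
          have htr : (c :: rest).reverse.takeWhile Char.isDigit
              = (r :: rest').reverse.takeWhile Char.isDigit := by
            rw [hshape]
            simp only [List.reverse_append, List.reverse_cons, List.append_assoc,
              List.cons_append, pv_takeWhile_stop Char.isDigit r hrd]
          rw [hB, hr, hA, htr, ih (r :: rest') (i + (c :: ds).length) hlen2]
          rw [List.cons_append]
          congr 2
          split_ifs with h
          · have hle : ((r :: rest').reverse.takeWhile Char.isDigit).length ≤ (r :: rest').length := by
              have := (List.takeWhile_prefix (p := Char.isDigit) (l := (r :: rest').reverse)).length_le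
              simpa using this
            have hlen3 : (c :: rest).length = (c :: ds).length + (r :: rest').length := by
              rw [hshape]; simp; omega
            have e1 : i + (c :: ds).length + (r :: rest').length
                  - ((r :: rest').reverse.takeWhile Char.isDigit).length
                = i + (c :: rest).length
                  - ((r :: rest').reverse.takeWhile Char.isDigit).length := by omega
            have e2 : i + (c :: ds).length + (r :: rest').length - 1
                = i + (c :: rest).length - 1 := by omega
            rw [e1, e2]
          · rfl

-- trailing-run facts used by the final theorems
theorem pv_trailing_le (cs : List Char) :
    (cs.reverse.takeWhile Char.isDigit).length ≤ cs.length := by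
  have := (List.takeWhile_prefix (p := Char.isDigit) (l := cs.reverse)).length_le
  simpa using this

-- both sides of the claim, computed through the run lists
theorem pv_both (line : String) (min_i max_i : Int)
    (hdom : Dom_find_at_index line min_i max_i) :
    find_at_index line min_i max_i = pvBFilt min_i max_i (pvARuns line.toList 0) ∧
    find_at_index_alt line min_i max_i
      = pvBFilt min_i max_i (pvARuns line.toList 0) ++
        pvBFilt min_i max_i
          (if 0 < (line.toList.reverse.takeWhile Char.isDigit).length then
             [(0 + line.toList.length - (line.toList.reverse.takeWhile Char.isDigit).length,
               0 + line.toList.length - 1, (line.toList.reverse.takeWhile Char.isDigit).reverse)]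
           else []) := by
  have hchars : ∀ c ∈ line.toList, pvDomChar c = true := by
    have h1 : pvDomStr line = true := by
      unfold Dom_find_at_index at hdom
      simp at hdom
      exact hdom.1.1
    simpa [pvDomStr, List.all_eq_true] using h1
  constructor
  · unfold find_at_index
    have := pv_main min_i max_i line.toList.length line.toList 0 [] (le_refl _) hchars
    simpa using this
  · unfold find_at_index_alt
    rw [pv_runs_rel line.toList.length line.toList 0 (le_refl _)]
    unfold pvBFilt
    rw [List.filterMap_append]

-- ===== VERDICT =====
theorem find_at_index_spec : Claim_unchanged_find_at_index := by
  intro line min_i max_i hdom hnD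
  obtain ⟨hA, hB⟩ := pv_both line min_i max_i hdom
  rw [hA, hB]
  set t := (line.toList.reverse.takeWhile Char.isDigit).length with ht
  by_cases hpos : 0 < t
  · rw [if_pos hpos]
    have hle : t ≤ line.toList.length := pv_trailing_le line.toList
    have hnc : ¬ (((0 + line.toList.length - t : Nat) : Int) ≤ max_i ∧
        min_i ≤ ((0 + line.toList.length - 1 : Nat) : Int)) := by
      rintro ⟨h1, h2⟩
      apply hnD
      unfold D_find_at_index
      exact ⟨hpos, by omega, by omega⟩
    simp only [pvBFilt, List.filterMap_cons, List.filterMap_nil, hnc, if_false]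
    simp
  · rw [if_neg hpos]
    simp [pvBFilt]

set_option maxRecDepth 8192 in
theorem find_at_index_changed : Claim_changed_find_at_index := by
  unfold Claim_changed_find_at_index
  refine ⟨by decide, by decide, by decide, ?_, by decide⟩
  show find_at_index_alt "5" 0 0 = ["5"]
  unfold find_at_index_alt
  rw [show ("5" : String).toList = ['5'] from rfl, pvBRuns.eq_2]
  simp [pvBRuns.eq_1, pvBFilt]

theorem find_at_index_tight : Claim_exact_find_at_index := by
  intro line min_i max_i hdom hD
  unfold D_find_at_index at hD
  obtain ⟨hpos, h1, h2⟩ := hD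
  obtain ⟨hA, hB⟩ := pv_both line min_i max_i hdom
  rw [hA, hB]
  set t := (line.toList.reverse.takeWhile Char.isDigit).length with ht
  rw [if_pos hpos]
  have hle : t ≤ line.toList.length := pv_trailing_le line.toList
  have hc : (((0 + line.toList.length - t : Nat) : Int) ≤ max_i ∧
      min_i ≤ ((0 + line.toList.length - 1 : Nat) : Int)) := ⟨by omega, by omega⟩
  simp only [pvBFilt, List.filterMap_cons, List.filterMap_nil, hc]
  intro heq
  have hlen := congrArg List.length heq
  simp at hlen
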